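-- pv_equiv track=rewrite | github.com/EvonneMa/wanmen_git | sjjgysf/homework/hw3/hw3_4.py | print_ruler
-- ===== SOURCE A (Python) =====
-- def print_ruler(m):
-- 	if m == 1:
-- 		return [1]
-- 	ans = print_ruler(m-1)
-- 	res = []
-- 	res.extend(ans)
-- 	res.append(m)
-- 	res.extend(ans)
-- 	return res
-- ===== SOURCE B (Python) =====
-- def print_ruler(m):
-- 	res = []
-- 	for k in range(1, 2**m):
-- 		c = 1
-- 		while k % 2 == 0:
-- 			k //= 2
-- 			c += 1
-- 		res.append(c)
-- 	return res
-- ===== Notes on version B (the rewrite author's own statement) =====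
-- stated objective: alternative
-- what changed: Replaced the recursive double-and-insert construction with a single flat loop over range(1, 2**m) that computes each entry directly as (trailing zeros of k)+1 via a small division loop.
import Mathlib
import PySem

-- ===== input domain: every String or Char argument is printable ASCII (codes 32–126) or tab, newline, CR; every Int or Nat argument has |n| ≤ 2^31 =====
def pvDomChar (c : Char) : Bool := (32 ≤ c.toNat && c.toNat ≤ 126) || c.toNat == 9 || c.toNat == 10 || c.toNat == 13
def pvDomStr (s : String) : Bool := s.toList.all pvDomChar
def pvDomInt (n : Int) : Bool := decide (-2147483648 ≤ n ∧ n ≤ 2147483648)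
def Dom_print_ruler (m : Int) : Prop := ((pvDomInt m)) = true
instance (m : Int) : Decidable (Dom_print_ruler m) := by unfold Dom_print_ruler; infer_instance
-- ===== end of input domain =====

-- B replaces A's recursive double-and-insert construction by one flat loop computing
-- each entry as (trailing zeros)+1; equal output on every m ≥ 1 (alternative, not claimed faster).


-- ===== PORT A =====
-- literal port of A's recursion; on m ≤ 0 Python recurses forever (RecursionError),
-- the port returns [] there and Pre_ excludes those inputs
def print_ruler (m : Int) : List Int :=
  if m = 1 then [1]
  else if m ≤ 0 then []
  else
    let ans := print_ruler (m - 1)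
    (([] : List Int) ++ ans ++ [m]) ++ ans
termination_by m.toNat
decreasing_by omega

-- ===== PORT B =====
-- the inner `while k % 2 == 0: k //= 2; c += 1` loop of Source B
def tzGo (k : Int) (c : Int) : Int :=
  if 0 < k ∧ PySem.Int.mod k 2 = 0 then tzGo (PySem.Int.floordiv k 2) (c + 1) else c
termination_by k.toNat
decreasing_by
  rename_i h
  rw [PySem.Int.floordiv_eq_ediv_of_pos (by omega)]
  omega

def print_ruler_alt (m : Int) : List Int :=
  (PySem.List.pyRange 1 ((2 : Int) ^ m.toNat) 1).map (fun k => tzGo k 1)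

-- ===== PRECONDITION & SPEC =====
-- Pre_: A returns normally exactly for m ≥ 1; on m ≤ 0 its recursion never reaches the base case (RecursionError)
def Pre_print_ruler (m : Int) : Prop := 1 ≤ m
instance (m : Int) : Decidable (Pre_print_ruler m) := by unfold Pre_print_ruler; infer_instance
def pvWitness_print_ruler : Int := 3

def Spec_print_ruler (m : Int) (out : List Int) : Prop := out = print_ruler_alt m
instance (m : Int) (out : List Int) : Decidable (Spec_print_ruler m out) := by unfold Spec_print_ruler; infer_instance

-- ===== CLAIM (what is proved, stated in full; the proofs are below) =====
def Claim_equal_print_ruler : Prop := ∀ (m : Int), Dom_print_ruler m → Pre_print_ruler m → Spec_print_ruler m (print_ruler m)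

-- ===== LEMMAS AND PROOFS =====

theorem tzGo_pow (n : Nat) (c : Int) : tzGo ((2 : Int) ^ n) c = c + n := by
  induction n generalizing c with
  | zero => rw [tzGo, if_neg (by decide)]; simp
  | succ n ih =>
      rw [tzGo]
      have h2 : PySem.Int.mod ((2:Int) ^ (n+1)) 2 = 0 := by
        rw [PySem.Int.mod_eq_emod_of_pos (by omega)]
        simp [pow_succ, Int.mul_emod_left]
      have hd : PySem.Int.floordiv ((2:Int) ^ (n+1)) 2 = (2:Int) ^ n := by
        rw [PySem.Int.floordiv_eq_ediv_of_pos (by omega), pow_succ]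
        simp
      rw [if_pos ⟨by positivity, h2⟩, hd, ih]
      push_cast; ring

theorem tzGo_shift (n : Nat) : ∀ j c : Int, 1 ≤ j → j < (2:Int) ^ (n+1) →
    tzGo (j + (2:Int) ^ (n+1)) c = tzGo j c := by
  induction n with
  | zero =>
      intro j c h1 h2
      have hj : j = 1 := by omega
      subst hj; rw [tzGo, if_neg (by decide), tzGo, if_neg (by decide)]
  | succ n ih =>
      intro j c h1 h2
      by_cases hpar : PySem.Int.mod j 2 = 0
      · -- j even: unfold both, recurse via ih on j/2
        have hmod : PySem.Int.mod (j + (2:Int) ^ (n+2)) 2 = 0 := by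
          rw [PySem.Int.mod_eq_emod_of_pos (by omega)] at hpar ⊢
          have : ((2:Int) ^ (n+2)) % 2 = 0 := by
            simp [pow_succ, Int.mul_emod_left]
          omega
        have hdiv : PySem.Int.floordiv (j + (2:Int) ^ (n+2)) 2
            = PySem.Int.floordiv j 2 + (2:Int) ^ (n+1) := by
          rw [PySem.Int.floordiv_eq_ediv_of_pos (by omega),
              PySem.Int.floordiv_eq_ediv_of_pos (by omega)]
          rw [PySem.Int.mod_eq_emod_of_pos (by omega)] at hpar
          have hp : (2:Int) ^ (n+2) = 2 * (2:Int) ^ (n+1) := by ring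
          omega
        rw [tzGo, if_pos ⟨by positivity, hmod⟩, hdiv]
        conv_rhs => rw [tzGo, if_pos ⟨by omega, hpar⟩]
        have hj2 : (1:Int) ≤ PySem.Int.floordiv j 2 ∧ PySem.Int.floordiv j 2 < (2:Int) ^ (n+1) := by
          rw [PySem.Int.floordiv_eq_ediv_of_pos (by omega)]
          rw [PySem.Int.mod_eq_emod_of_pos (by omega)] at hpar
          constructor <;> [omega; (rw [pow_succ] at h2; omega)]
        exact ih _ _ hj2.1 hj2.2
      · -- j odd: both stop immediately
        have hmod : ¬ PySem.Int.mod (j + (2:Int) ^ (n+2)) 2 = 0 := by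
          rw [PySem.Int.mod_eq_emod_of_pos (by omega)] at hpar ⊢
          have : ((2:Int) ^ (n+2)) % 2 = 0 := by simp [pow_succ, Int.mul_emod_left]
          omega
        rw [tzGo, if_neg (by tauto)]
        rw [tzGo, if_neg (by tauto)]

theorem main_equiv (n : Nat) (hn : 1 ≤ n) : print_ruler (n : Int) = print_ruler_alt (n : Int) := by
  induction n with
  | zero => omega
  | succ n ih =>
      by_cases hn1 : n = 0
      · subst hn1
        rw [show ((0+1 : Nat) : Int) = 1 by norm_num, print_ruler, if_pos rfl]
        rw [print_ruler_alt]
        norm_num [PySem.List.pyRange_one]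
        rw [tzGo, if_neg (by decide)]
      · have h1n : 1 ≤ n := by omega
        have ihn := ih h1n
        have hcast : ((n + 1 : Nat) : Int) - 1 = (n : Int) := by push_cast; ring
        rw [print_ruler, if_neg (by exact_mod_cast (by omega : (n:Int) + 1 ≠ 1)),
            if_neg (by push_cast; omega)]
        simp only [hcast, ihn]
        -- unfold the alt sides
        unfold print_ruler_alt
        have ht1 : ((n + 1 : Nat) : Int).toNat = n + 1 := by omega
        have ht2 : ((n : Nat) : Int).toNat = n := by omega
        rw [ht1, ht2]
        have hsplit : PySem.List.pyRange 1 ((2:Int) ^ (n+1)) 1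
            = PySem.List.pyRange 1 ((2:Int) ^ n) 1 ++ PySem.List.pyRange ((2:Int) ^ n) ((2:Int) ^ (n+1)) 1 := by
          refine PySem.List.pyRange_one_append _ _ _ (one_le_pow₀ (by norm_num)) ?_
          rw [pow_succ]; nlinarith [pow_pos (by norm_num : (0:Int) < 2) n]
        have hmid : PySem.List.pyRange ((2:Int) ^ n) ((2:Int) ^ (n+1)) 1
            = (2:Int) ^ n :: PySem.List.pyRange ((2:Int) ^ n + 1) ((2:Int) ^ (n+1)) 1 := by
          refine PySem.List.pyRange_one_cons ?_
          rw [pow_succ]; nlinarith [pow_pos (by norm_num : (0:Int) < 2) n]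
        rw [hsplit, hmid]
        simp only [List.map_append, List.map_cons, List.nil_append]
        have hval : tzGo ((2:Int) ^ n) 1 = ((n : Int) + 1) := by
            rw [tzGo_pow]; ring
        have htail : (PySem.List.pyRange ((2:Int) ^ n + 1) ((2:Int) ^ (n+1)) 1).map (fun k => tzGo k 1)
            = (PySem.List.pyRange 1 ((2:Int) ^ n) 1).map (fun k => tzGo k 1) := by
          rw [PySem.List.pyRange_one, PySem.List.pyRange_one]
          have hlen : ((2:Int) ^ (n+1) - ((2:Int) ^ n + 1)).toNat = ((2:Int) ^ n - 1).toNat := by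
            rw [pow_succ]; omega
          rw [hlen, List.map_map, List.map_map]
          refine List.map_congr_left ?_
          intro k hk
          simp only [Function.comp_apply, List.mem_range] at hk ⊢
          have h2n : (1:Int) ≤ (2:Int) ^ n := one_le_pow₀ (by norm_num)
          have hkb : (k : Int) < (2:Int) ^ n - 1 := by omega
          have harith : (2:Int) ^ n + 1 + (k : Int) = (1 + (k : Int)) + (2:Int) ^ ((n - 1) + 1) := by
            have hnn : n - 1 + 1 = n := by omega
            rw [hnn]; ring
          have hrw : (2:Int) ^ ((n-1)+1) = (2:Int) ^ n := by congr 1; omega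
          rw [harith, tzGo_shift (n-1) (1 + (k:Int)) 1 (by omega) (by rw [hrw]; omega)]
        rw [hval, htail]
        push_cast
        simp [List.append_assoc]

-- ===== VERDICT (by name: the statement is the Claim_ definition above) =====
theorem print_ruler_spec : Claim_equal_print_ruler := by
  intro m _ hpre
  unfold Spec_print_ruler
  have hm : m = ((m.toNat : Nat) : Int) := by
    unfold Pre_print_ruler at hpre; omega
  rw [hm]
  exact main_equiv m.toNat (by unfold Pre_print_ruler at hpre; omega)
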